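-- pv_equiv track=rewrite | github.com/ayazkhan27/cyclic | cyclicencryptwithkey.py | generate_target_sequences
-- ===== SOURCE A (Python) =====
-- def generate_target_sequences(prime, cyclic_sequence):
--     sequence_length = len(cyclic_sequence)
--     group_length = len(str(prime))
--
--     if prime < 10:
--         return sorted(set(cyclic_sequence))
--     else:
--         cyclic_groups = []
--         for i in range(sequence_length):
--             group = cyclic_sequence[i:i+group_length]
--             if len(group) == group_length:
--                 cyclic_groups.append(group)
--             else:  # Wrap-around case
--                 wrap_around_group = cyclic_sequence[i:] + cyclic_sequence[:group_length-len(group)]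
--                 cyclic_groups.append(wrap_around_group)
--
--         cyclic_groups = sorted(set(cyclic_groups))
--         return cyclic_groups[:prime - 1]
-- ===== SOURCE B (Python) =====
-- def _insert_unique(acc, x):
--     for j, y in enumerate(acc):
--         if x == y:
--             return acc
--         if x < y:
--             return acc[:j] + [x] + acc[j:]
--     return acc + [x]
--
--
-- def generate_target_sequences(prime, cyclic_sequence):
--     if prime < 10:
--         acc = []
--         for ch in cyclic_sequence:
--             acc = _insert_unique(acc, ch)
--         return acc
--     group_length = len(str(prime))
--     extended = cyclic_sequence + cyclic_sequence[:group_length - 1]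
--     acc = []
--     for i in range(len(cyclic_sequence)):
--         acc = _insert_unique(acc, extended[i:i + group_length])
--     return acc[:prime - 1]
-- ===== Notes on version B (the rewrite author's own statement) =====
-- stated objective: alternative
-- what changed: B replaces A's collect-all-windows-into-a-set-then-sort with a single pass that maintains a sorted duplicate-free accumulator by ordered insertion (skip on equal, insert before the first larger element), taking each window as one uniform slice of a precomputed extended string instead of A's per-index full-slice/wrap branch.
import Mathlib
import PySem

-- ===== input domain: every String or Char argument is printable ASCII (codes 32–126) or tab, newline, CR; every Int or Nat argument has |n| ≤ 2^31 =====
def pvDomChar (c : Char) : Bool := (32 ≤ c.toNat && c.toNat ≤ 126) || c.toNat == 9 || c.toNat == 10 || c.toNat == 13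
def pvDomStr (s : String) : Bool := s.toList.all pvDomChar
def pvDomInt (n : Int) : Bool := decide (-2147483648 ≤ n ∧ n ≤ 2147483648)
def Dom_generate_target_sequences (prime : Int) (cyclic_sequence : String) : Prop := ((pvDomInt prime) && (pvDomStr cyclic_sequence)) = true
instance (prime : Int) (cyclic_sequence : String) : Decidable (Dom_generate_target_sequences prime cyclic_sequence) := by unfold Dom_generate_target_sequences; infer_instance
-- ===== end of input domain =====

-- B replaces A's collect-into-a-set-then-sort with a single pass that keeps a sorted duplicate-free
-- accumulator by ordered insertion, and takes windows as uniform slices of one extended string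
-- (objective: alternative; same result, different data-structure maintenance).

-- ===== PORT A =====
def generate_target_sequences (prime : Int) (cyclic_sequence : String) : List String :=
  let s := cyclic_sequence.toList
  let sequence_length := s.length
  let group_length := (PySem.Int.toChars prime).length
  if prime < 10 then
    (PySem.List.sorted (PySem.Set.ofList s) (fun c => c) false).map (fun c => String.ofList [c])
  else
    let cyclic_groups : List (List Char) :=
      (PySem.List.pyRange 0 (sequence_length : Int) 1).foldl (fun acc i =>
        let group := PySem.List.slice s (some i) (some (i + (group_length : Int)))
        if group.length = group_length then acc ++ [group]
        else acc ++ [PySem.List.slice s (some i) none ++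
                     PySem.List.slice s none (some ((group_length : Int) - (group.length : Int)))]) []
    let sorted_groups := PySem.List.sorted (PySem.Set.ofList cyclic_groups) (fun x => x) false
    (PySem.List.slice sorted_groups none (some (prime - 1))).map (fun w => String.ofList w)

-- ===== PORT B =====
-- Source B's _insert_unique: scan the sorted accumulator; stop on an equal element, insert before the
-- first larger one, otherwise append at the end.
def pvInsertUnique {α : Type} [LinearOrder α] (acc : List α) (x : α) : List α :=
  match acc with
  | [] => [x]
  | y :: t => if x = y then y :: t
              else if x < y then x :: y :: t
              else y :: pvInsertUnique t x

def generate_target_sequences_alt (prime : Int) (cyclic_sequence : String) : List String :=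
  let s := cyclic_sequence.toList
  if prime < 10 then
    (s.foldl pvInsertUnique ([] : List Char)).map (fun c => String.ofList [c])
  else
    let group_length := (PySem.Int.toChars prime).length
    let extended := s ++ PySem.List.slice s none (some ((group_length : Int) - 1))
    let acc : List (List Char) :=
      (PySem.List.pyRange 0 (s.length : Int) 1).foldl (fun acc i =>
        pvInsertUnique acc (PySem.List.slice extended (some i) (some (i + (group_length : Int))))) []
    (PySem.List.slice acc none (some (prime - 1))).map (fun w => String.ofList w)

-- ===== PRECONDITION & SPEC =====
def Spec_generate_target_sequences (prime : Int) (cyclic_sequence : String) (out : List String) : Prop := out = generate_target_sequences_alt prime cyclic_sequence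
instance (prime : Int) (cyclic_sequence : String) (out : List String) : Decidable (Spec_generate_target_sequences prime cyclic_sequence out) := by unfold Spec_generate_target_sequences; infer_instance

-- ===== CLAIM (what is proved, stated in full; the proofs are below) =====
def Claim_equal_generate_target_sequences : Prop := ∀ (prime : Int) (cyclic_sequence : String), Dom_generate_target_sequences prime cyclic_sequence → Spec_generate_target_sequences prime cyclic_sequence (generate_target_sequences prime cyclic_sequence)

-- ===== LEMMAS AND PROOFS =====

-- elements of an ordered insertion: the inserted element or an old one
lemma pvIU_mem {α : Type} [LinearOrder α] (acc : List α) (x z : α) :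
    z ∈ pvInsertUnique acc x ↔ z = x ∨ z ∈ acc := by
  induction acc with
  | nil => simp [pvInsertUnique]
  | cons y t ih =>
    simp only [pvInsertUnique]
    split_ifs with hxy hlt
    · subst hxy; simp
    · simp
    · simp [ih]; tauto

-- ordered insertion preserves strict sortedness
lemma pvIU_pairwise {α : Type} [LinearOrder α] {acc : List α} (x : α)
    (hs : acc.Pairwise (· < ·)) : (pvInsertUnique acc x).Pairwise (· < ·) := by
  induction acc with
  | nil => simp [pvInsertUnique]
  | cons y t ih =>
    rcases List.pairwise_cons.mp hs with ⟨hy, ht⟩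
    by_cases hxy : x = y
    · simpa only [pvInsertUnique, if_pos hxy] using hs
    · by_cases hlt : x < y
      · simp only [pvInsertUnique, if_neg hxy, if_pos hlt]
        refine List.pairwise_cons.mpr ⟨?_, hs⟩
        intro z hz
        rcases List.mem_cons.mp hz with rfl | hz
        · exact hlt
        · exact lt_trans hlt (hy z hz)
      · have hyx : y < x := lt_of_le_of_ne (not_lt.mp hlt) (Ne.symm hxy)
        simp only [pvInsertUnique, if_neg hxy, if_neg hlt]
        refine List.pairwise_cons.mpr ⟨?_, ih ht⟩
        intro z hz
        rcases (pvIU_mem t x z).mp hz with rfl | hz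
        · exact hyx
        · exact hy z hz

-- the single-pass accumulator: strictly sorted, holding exactly acc's and xs's elements
lemma pvFold_inv {α : Type} [LinearOrder α] (xs : List α) (acc : List α)
    (hs : acc.Pairwise (· < ·)) :
    (xs.foldl pvInsertUnique acc).Pairwise (· < ·) ∧
      (∀ z, z ∈ xs.foldl pvInsertUnique acc ↔ z ∈ acc ∨ z ∈ xs) := by
  induction xs generalizing acc with
  | nil => simp [hs]
  | cons x xs ih =>
    obtain ⟨h1, h2⟩ := ih (pvInsertUnique acc x) (pvIU_pairwise x hs)
    refine ⟨h1, fun z => ?_⟩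
    rw [List.foldl_cons, h2, pvIU_mem]
    simp
    tauto

-- the single-pass sorted-unique accumulator equals sorted(set(xs))
lemma pvFold_sorted {α : Type} [LinearOrder α] [BEq α] [LawfulBEq α] (xs : List α) :
    PySem.List.sorted (PySem.Set.ofList xs) (fun x => x) false = xs.foldl pvInsertUnique [] := by
  obtain ⟨h1, h2⟩ := pvFold_inv xs [] List.Pairwise.nil
  apply PySem.List.sorted_eq_of_perm_of_pairwise_lt
  · rw [List.perm_ext_iff_of_nodup (h1.imp ne_of_lt) (PySem.Set.nodup_ofList xs)]
    intro z
    rw [h2, PySem.Set.mem_ofList]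
    simp
  · exact h1

-- A's per-index window (full slice or wrap concatenation) equals B's uniform slice of the extended list.
lemma pv_window_eq (s : List Char) (g k : Nat) (hg : 1 ≤ g) (hk : k < s.length) :
    (if ((s.drop k).take g).length = g then (s.drop k).take g
     else s.drop k ++ s.take (g - ((s.drop k).take g).length))
    = ((s ++ s.take (g - 1)).drop k).take g := by
  have hlen : ((s.drop k).take g).length = min g (s.length - k) := by
    simp [List.length_take, List.length_drop]
  rw [List.drop_append_of_le_length (by omega)]
  by_cases h : g ≤ s.length - k
  · rw [if_pos (by omega)]
    rw [List.take_append_of_le_length (by simp [List.length_drop]; omega)]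
  · rw [if_neg (by omega)]
    rw [List.take_append, List.take_of_length_le (l := s.drop k) (i := g)
          (by simp [List.length_drop]; omega),
        List.take_take]
    simp only [List.length_drop]
    congr 2
    omega

-- ===== VERDICT (by name: the statement is the Claim_ definition above) =====
theorem generate_target_sequences_spec : Claim_equal_generate_target_sequences := by
  intro prime cyclic_sequence _
  unfold Spec_generate_target_sequences generate_target_sequences generate_target_sequences_alt
  by_cases hp : prime < 10
  · simp only [hp, if_true]
    congr 1
    convert pvFold_sorted cyclic_sequence.toList using 2
  · simp only [hp, if_false]
    set s := cyclic_sequence.toList with hs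
    set g := (PySem.Int.toChars prime).length with hgdef
    have hg : 1 ≤ g := by
      rw [hgdef]; unfold PySem.Int.toChars
      split
      · simp
      · exact Nat.length_toDigits_pos
    -- A's append-loop is a map over the range
    have hfold :
        (PySem.List.pyRange 0 (s.length : Int) 1).foldl (fun acc i =>
          let group := PySem.List.slice s (some i) (some (i + (g : Int)))
          if group.length = g then acc ++ [group]
          else acc ++ [PySem.List.slice s (some i) none ++
                       PySem.List.slice s none (some ((g : Int) - (group.length : Int)))]) []
        = (PySem.List.pyRange 0 (s.length : Int) 1).map (fun i =>
            let group := PySem.List.slice s (some i) (some (i + (g : Int)))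
            if group.length = g then group
            else PySem.List.slice s (some i) none ++
                 PySem.List.slice s none (some ((g : Int) - (group.length : Int)))) := by
      have hfun : (fun (acc : List (List Char)) (i : Int) =>
          let group := PySem.List.slice s (some i) (some (i + (g : Int)))
          if group.length = g then acc ++ [group]
          else acc ++ [PySem.List.slice s (some i) none ++
                       PySem.List.slice s none (some ((g : Int) - (group.length : Int)))])
          = (fun acc i => acc ++ [
              let group := PySem.List.slice s (some i) (some (i + (g : Int)))
              if group.length = g then group
              else PySem.List.slice s (some i) none ++
                   PySem.List.slice s none (some ((g : Int) - (group.length : Int)))]) := by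
        funext acc i
        dsimp only
        split <;> rfl
      rw [hfun, PySem.List.foldl_append_singleton_eq_map]
      simp
    rw [hfold]
    -- the two per-index window functions agree on every i in the range
    have hmap : (PySem.List.pyRange 0 (s.length : Int) 1).map (fun i =>
            let group := PySem.List.slice s (some i) (some (i + (g : Int)))
            if group.length = g then group
            else PySem.List.slice s (some i) none ++
                 PySem.List.slice s none (some ((g : Int) - (group.length : Int))))
        = (PySem.List.pyRange 0 (s.length : Int) 1).map (fun i =>
            PySem.List.slice (s ++ PySem.List.slice s none (some ((g : Int) - 1)))
              (some i) (some (i + (g : Int)))) := by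
      apply List.map_congr_left
      intro i hi
      rw [PySem.List.mem_pyRange_one] at hi
      obtain ⟨k, rfl⟩ : ∃ k : Nat, i = (k : Int) := ⟨i.toNat, (Int.toNat_of_nonneg hi.1).symm⟩
      have hk : k < s.length := by exact_mod_cast hi.2
      have hgc : ((g : Int) - 1) = ((g - 1 : Nat) : Int) := by omega
      have hslice : PySem.List.slice s (some (k : Int)) (some ((k : Int) + (g : Int)))
          = (s.drop k).take g := PySem.List.slice_natCast_add s k g
      have hlen : ((s.drop k).take g).length ≤ g := by
        simp [List.length_take]
      have hcast : ((g : Int) - (((s.drop k).take g).length : Int))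
          = ((g - ((s.drop k).take g).length : Nat) : Int) := by omega
      dsimp only
      rw [hslice, hgc, hcast, PySem.List.slice_from_natCast, PySem.List.slice_to_natCast,
          PySem.List.slice_to_natCast, PySem.List.slice_natCast_add]
      exact pv_window_eq s g k hg hk
    rw [hmap, ← List.foldl_map]
    congr 1
    congr 1
    convert pvFold_sorted (List.map (fun i => PySem.List.slice
        (s ++ PySem.List.slice s none (some ((g : Int) - 1))) (some i) (some (i + (g : Int))))
        (PySem.List.pyRange 0 (s.length : Int) 1)) using 2
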